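-- pv_equiv track=rewrite | github.com/youyue271/pwnfix_plugin | detectors/stack_overflow.py | _has_unbounded_scanf_string
-- ===== SOURCE A (Python) =====
-- def _has_unbounded_scanf_string(fmt):
--     idx = 0
--     while idx < len(fmt):
--         if fmt[idx] != "%":
--             idx += 1
--             continue
--
--         idx += 1
--         if idx < len(fmt) and fmt[idx] == "%":
--             idx += 1
--             continue
--
--         if idx < len(fmt) and fmt[idx] == "*":
--             idx += 1
--
--         width_start = idx
--         while idx < len(fmt) and fmt[idx].isdigit():
--             idx += 1
--         has_width = idx > width_start
--
--         while idx < len(fmt) and fmt[idx] in "hljztL":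
--             idx += 1
--
--         if idx >= len(fmt):
--             break
--
--         spec = fmt[idx]
--         if spec == "[":
--             end = fmt.find("]", idx + 1)
--             if end == -1:
--                 return True
--             if not has_width:
--                 return True
--             idx = end + 1
--             continue
--
--         if spec == "s" and not has_width:
--             return True
--
--         idx += 1
--
--     if not fmt:
--         return True
--
--     return False
-- ===== SOURCE B (Python) =====
-- import re
--
-- # One scanf conversion starting at a '%': optional '*', optional width digits,
-- # length modifiers, then either a scanset or any single character; the final
-- # group is optional so a truncated spec at end of string fails to produce it.
-- _SPEC = re.compile(r'%(\*?)(\d*)([hljztL]*)(\[[^\]]*\]?|.)?', re.DOTALL)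
--
-- def _has_unbounded_scanf_string(fmt):
--     if not fmt:
--         return True
--     pos = 0
--     while True:
--         pos = fmt.find('%', pos)
--         if pos == -1:
--             return False
--         m = _SPEC.match(fmt, pos)
--         conv = m.group(4)
--         if conv is None:          # truncated spec at end of format
--             return False
--         has_width = bool(m.group(2))
--         if conv == 's' and not has_width:
--             return True
--         if conv.startswith('['):
--             if not conv.endswith(']') or not has_width:
--                 return True
--         pos = m.end()
-- ===== Notes on version B (the rewrite author's own statement) =====
-- stated objective: idiomatic
-- what changed: Replaces A's char-by-char index loop with manual state stepping by a find-next-'%' cursor plus one compiled-regex match per conversion spec (scanset-or-single-char alternative), advancing by the match length.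
import Mathlib
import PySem

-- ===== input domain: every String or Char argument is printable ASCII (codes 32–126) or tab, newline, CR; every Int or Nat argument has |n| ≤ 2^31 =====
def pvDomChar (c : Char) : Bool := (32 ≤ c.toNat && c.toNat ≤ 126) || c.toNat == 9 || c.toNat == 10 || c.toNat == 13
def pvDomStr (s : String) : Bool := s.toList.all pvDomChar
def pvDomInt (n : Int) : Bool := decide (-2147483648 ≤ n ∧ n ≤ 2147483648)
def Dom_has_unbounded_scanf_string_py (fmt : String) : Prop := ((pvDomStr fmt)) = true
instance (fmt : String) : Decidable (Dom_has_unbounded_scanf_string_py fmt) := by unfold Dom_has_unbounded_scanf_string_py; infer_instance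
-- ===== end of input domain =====

-- B replaces A's char-by-char index loop by a find-next-'%' cursor with a single
-- regex-shaped spec matcher (objective: idiomatic); same return value everywhere.

-- scanf length modifiers (the string "hljztL" of both Pythons)
def scanfMods : List Char := ['h', 'l', 'j', 'z', 't', 'L']

-- ===== PORT A =====
-- A's width while-loop: number of digits consumed and the remaining suffix
def digitCountA : List Char → Nat × List Char
  | [] => (0, [])
  | c :: t =>
    if c.isDigit then
      let p := digitCountA t
      (p.1 + 1, p.2)
    else (0, c :: t)

-- A's modifier while-loop
def modsA : List Char → List Char
  | [] => []
  | c :: t => if scanfMods.contains c then modsA t else c :: t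

-- A's fmt.find("]", idx+1): none = -1, some r = the suffix after the first ']'
def findRBA : List Char → Option (List Char)
  | [] => none
  | c :: t => if c = ']' then some t else findRBA t

theorem digitCountA_le (l : List Char) : (digitCountA l).2.length ≤ l.length := by
  induction l with
  | nil => simp [digitCountA]
  | cons c t ih => simp only [digitCountA]; split <;> simp <;> omega

theorem modsA_le (l : List Char) : (modsA l).length ≤ l.length := by
  induction l with
  | nil => simp [modsA]
  | cons c t ih => simp only [modsA]; split <;> simp <;> omega

theorem r1_le (rest : List Char) :
    (if rest.head? = some '*' then rest.tail else rest).length ≤ rest.length := by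
  split <;> simp [List.length_tail]

theorem findRBA_lt (l : List Char) (r : List Char) (h : findRBA l = some r) :
    r.length < l.length := by
  induction l generalizing r with
  | nil => simp [findRBA] at h
  | cons c t ih =>
    simp only [findRBA] at h
    split at h
    · cases h; simp
    · have := ih r h; simp; omega

-- the main while loop of A, transliterated over the remaining suffix
def loopA (cs : List Char) : Bool :=
  match cs with
  | [] => false
  | c :: rest =>
    if c ≠ '%' then loopA rest
    else if rest.head? = some '%' then loopA rest.tail
    else
      let r1 := if rest.head? = some '*' then rest.tail else rest
      let p := digitCountA r1
      let hasWidth : Bool := decide (0 < p.1)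
      match hm : modsA p.2 with
      | [] => false
      | s :: u =>
        if s = '[' then
          match hf : findRBA u with
          | none => true
          | some r => if hasWidth = false then true else loopA r
        else if s = 's' ∧ hasWidth = false then true
        else loopA u
termination_by cs.length
decreasing_by
  · simp
  · simp only [List.length_cons, List.length_tail]; omega
  · have h1 : r1.length ≤ rest.length := r1_le rest
    have h2 : p.2.length ≤ r1.length := digitCountA_le r1
    have h3 := modsA_le p.2
    have h4 := findRBA_lt u r hf
    rw [hm] at h3
    simp only [List.length_cons] at h3 ⊢
    omega
  · have h1 : r1.length ≤ rest.length := r1_le rest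
    have h2 : p.2.length ≤ r1.length := digitCountA_le r1
    have h3 := modsA_le p.2
    rw [hm] at h3
    simp only [List.length_cons] at h3 ⊢
    omega

def has_unbounded_scanf_string_py (fmt : String) : Bool :=
  if loopA fmt.toList then true
  else if fmt.toList.isEmpty then true
  else false

-- ===== PORT B =====
-- port of one application of the compiled regex %(\*?)(\d*)([hljztL]*)(\[[^\]]*\]?|.)? at a '%'
-- (r = the text after the '%'); none = no conversion char (group 4 absent),
-- some (offending?, rest after the match)
def matchSpec (r : List Char) : Option (Bool × List Char) :=
  let r1 := if r.head? = some '*' then r.tail else r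
  let p := r1.span (·.isDigit)
  let hasWidth : Bool := !p.1.isEmpty
  match p.2.dropWhile (fun c => scanfMods.contains c) with
  | [] => none
  | '[' :: t =>
    match (t.span (· != ']')).2 with
    | [] => some (true, [])
    | _ :: rest' => some (!hasWidth, rest')
  | c :: t => some ((c == 's') && !hasWidth, t)

theorem matchSpec_le (r : List Char) (b : Bool) (r' : List Char)
    (h : matchSpec r = some (b, r')) : r'.length ≤ r.length := by
  have h1 : (if r.head? = some '*' then r.tail else r).length ≤ r.length := r1_le r
  unfold matchSpec at h
  simp only [List.span_eq_takeWhile_dropWhile] at h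
  have h2 := List.length_dropWhile_le (p := fun c : Char => c.isDigit)
    (l := if r.head? = some '*' then r.tail else r)
  have h3 := List.length_dropWhile_le (p := fun c => scanfMods.contains c)
    (l := (if r.head? = some '*' then r.tail else r).dropWhile (fun c : Char => c.isDigit))
  split at h
  · simp at h
  next t heq =>
    rw [heq] at h3
    have h4 := List.length_dropWhile_le (p := fun c : Char => c != ']') (l := t)
    split at h
    next heq2 =>
      simp only [Option.some.injEq, Prod.mk.injEq] at h
      obtain ⟨-, rfl⟩ := h
      simp
    next x t2 heq2 =>
      simp only [Option.some.injEq, Prod.mk.injEq] at h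
      obtain ⟨-, rfl⟩ := h
      rw [heq2] at h4
      simp only [List.length_cons] at h3 h4
      omega
  next c t heq =>
    rw [heq] at h3
    simp only [Option.some.injEq, Prod.mk.injEq] at h
    obtain ⟨-, rfl⟩ := h
    simp only [List.length_cons] at h3
    omega

-- B's cursor loop: jump to the next '%', apply the matcher, continue after the match
def loopB (cs : List Char) : Bool :=
  match hd : cs.dropWhile (· != '%') with
  | [] => false
  | _ :: rest =>
    match hm : matchSpec rest with
    | none => false
    | some (true, _) => true
    | some (false, rest') => loopB rest'
termination_by cs.length
decreasing_by
  have h1 := List.length_dropWhile_le (p := (· != '%')) (l := cs)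
  rw [hd] at h1
  have h2 := matchSpec_le rest false rest' hm
  simp at h1
  omega

def has_unbounded_scanf_string_py_alt (fmt : String) : Bool :=
  if fmt.toList.isEmpty then true
  else loopB fmt.toList

-- ===== PRECONDITION & SPEC =====
def Spec_has_unbounded_scanf_string_py (fmt : String) (out : Bool) : Prop := out = has_unbounded_scanf_string_py_alt fmt
instance (fmt : String) (out : Bool) : Decidable (Spec_has_unbounded_scanf_string_py fmt out) := by unfold Spec_has_unbounded_scanf_string_py; infer_instance

-- ===== CLAIM (what is proved, stated in full; the proofs are below) =====
def Claim_equal_has_unbounded_scanf_string_py : Prop := ∀ (fmt : String), Dom_has_unbounded_scanf_string_py fmt → Spec_has_unbounded_scanf_string_py fmt (has_unbounded_scanf_string_py fmt)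

-- ===== LEMMAS AND PROOFS =====

theorem digitCountA_eq (l : List Char) :
    digitCountA l = ((l.takeWhile (·.isDigit)).length, l.dropWhile (·.isDigit)) := by
  induction l with
  | nil => simp [digitCountA]
  | cons c t ih =>
    simp only [digitCountA, List.takeWhile_cons, List.dropWhile_cons]
    split <;> simp_all

theorem modsA_eq (l : List Char) :
    modsA l = l.dropWhile (fun c => scanfMods.contains c) := by
  induction l with
  | nil => simp [modsA]
  | cons c t ih =>
    simp only [modsA, List.dropWhile_cons]
    split <;> simp_all

theorem findRBA_eq (l : List Char) :
    findRBA l = match l.dropWhile (· != ']') with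
                | [] => none
                | _ :: r => some r := by
  induction l with
  | nil => simp [findRBA]
  | cons c t ih =>
    simp only [findRBA, List.dropWhile_cons]
    by_cases h : c = ']' <;> simp [h, ih]

theorem bool_width (l : List Char) : (!l.isEmpty) = decide (0 < l.length) := by
  cases l <;> simp

theorem loopB_nil : loopB [] = false := by
  rw [loopB]
  split
  next => rfl
  next x rest heq => simp at heq

-- non-dependent unfolding of loopB (its named matches block rewriting otherwise)
theorem loopB_eq (cs : List Char) : loopB cs =
    (match cs.dropWhile (· != '%') with
     | [] => false
     | _ :: rest =>
       match matchSpec rest with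
       | none => false
       | some (true, _) => true
       | some (false, rest') => loopB rest') := by
  rw [loopB]
  split
  next heq => simp [heq]
  next x rest heq =>
    split
    next heq2 => simp [heq, heq2]
    next snd heq2 => simp [heq, heq2]
    next rest2 heq2 => simp [heq, heq2]

theorem loopB_cons_ne (c : Char) (rest : List Char) (h : ¬c = '%') :
    loopB (c :: rest) = loopB rest := by
  rw [loopB_eq]
  conv_rhs => rw [loopB_eq]
  simp [List.dropWhile_cons, h]

theorem loopB_pct (rest : List Char) :
    loopB ('%' :: rest) =
      (match matchSpec rest with
       | none => false
       | some (true, _) => true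
       | some (false, rest') => loopB rest') := by
  rw [loopB_eq]
  simp [List.dropWhile_cons]

theorem loopA_nil : loopA [] = false := by
  rw [loopA]

theorem loopA_cons_ne (c : Char) (rest : List Char) (h : ¬c = '%') :
    loopA (c :: rest) = loopA rest := by
  rw [loopA]
  simp [h]

theorem loopA_pct_pct (t : List Char) : loopA ('%' :: '%' :: t) = loopA t := by
  rw [loopA]
  simp

-- non-dependent unfolding of loopA at a '%' that does not start "%%"
theorem loopA_pct (rest : List Char) (h : ¬rest.head? = some '%') :
    loopA ('%' :: rest) =
      (match modsA (digitCountA (if rest.head? = some '*' then rest.tail else rest)).2 with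
       | [] => false
       | s :: u =>
         if s = '[' then
           match findRBA u with
           | none => true
           | some r =>
             if decide (0 < (digitCountA (if rest.head? = some '*' then rest.tail else rest)).1) = false
             then true else loopA r
         else if s = 's' ∧ decide (0 < (digitCountA (if rest.head? = some '*' then rest.tail else rest)).1) = false
              then true else loopA u) := by
  rw [loopA]
  simp only [ne_eq, not_true_eq_false, if_false, h, ite_false, if_neg]
  split
  next heq => simp [heq]
  next s u heq =>
    split
    next hs =>
      subst hs
      split
      next hf => simp [heq, hf]
      next r hf => simp [heq, hf]
    next hs => simp [heq, hs]

theorem matchSpec_pct (t : List Char) : matchSpec ('%' :: t) = some (false, t) := by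
  simp [matchSpec, List.span_eq_takeWhile_dropWhile, List.takeWhile_cons, List.dropWhile_cons,
    scanfMods, show ('%' : Char).isDigit = false by decide, show ('%' == 's') = false by decide]

theorem loopA_eq_loopB : ∀ (n : Nat) (cs : List Char), cs.length ≤ n → loopA cs = loopB cs := by
  intro n
  induction n with
  | zero =>
    intro cs h
    cases cs with
    | nil => rw [loopA_nil, loopB_nil]
    | cons c t => simp at h
  | succ n ih =>
    intro cs hle
    cases cs with
    | nil => rw [loopA_nil, loopB_nil]
    | cons c rest =>
      have hrest : rest.length ≤ n := by simp only [List.length_cons] at hle; omega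
      by_cases hc : c = '%'
      case neg =>
        rw [loopA_cons_ne c rest hc, loopB_cons_ne c rest hc]
        exact ih rest hrest
      case pos =>
        subst hc
        rw [loopB_pct]
        by_cases hpp : rest.head? = some '%'
        · cases rest with
          | nil => simp at hpp
          | cons r0 t =>
            have hr0 : r0 = '%' := by simpa using hpp
            subst hr0
            rw [loopA_pct_pct, matchSpec_pct]
            exact ih t (by simp only [List.length_cons] at hrest; omega)
        · rw [loopA_pct rest hpp]
          have hr1len : (if rest.head? = some '*' then rest.tail else rest).length ≤ rest.length :=
            r1_le rest
          rw [digitCountA_eq]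
          unfold matchSpec
          simp only [List.span_eq_takeWhile_dropWhile, modsA_eq, bool_width]
          set r1 : List Char := if rest.head? = some '*' then rest.tail else rest with hr1
          set hw : Bool := decide (0 < (r1.takeWhile (·.isDigit)).length) with hhw
          have hd2 : (r1.dropWhile (·.isDigit)).length ≤ r1.length :=
            List.length_dropWhile_le _ _
          have hd3 : ((r1.dropWhile (·.isDigit)).dropWhile (fun c => scanfMods.contains c)).length ≤
              (r1.dropWhile (·.isDigit)).length := List.length_dropWhile_le _ _
          cases h3 : (r1.dropWhile (·.isDigit)).dropWhile (fun c => scanfMods.contains c) with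
          | nil => rfl
          | cons s u =>
            rw [h3] at hd3
            have hulen : u.length ≤ n := by
              simp only [List.length_cons] at hd3
              omega
            by_cases hs : s = '['
            · subst hs
              have hd4 := List.length_dropWhile_le (fun c : Char => c != ']') u
              cases h5 : u.dropWhile (· != ']') with
              | nil => simp [findRBA_eq, h5]
              | cons x v =>
                rw [h5] at hd4
                have hvlen : v.length ≤ n := by
                  simp only [List.length_cons] at hd4
                  omega
                cases hwv : hw with
                | false => simp [findRBA_eq, h5, hwv]
                | true => simp [findRBA_eq, h5, hwv, ih v hvlen]
            · by_cases hss : s = 's'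
              · subst hss
                cases hwv : hw with
                | false => simp [hs, hwv]
                | true => simp [hs, hwv, ih u hulen]
              · have hbe : (s == 's') = false := by simp [hss]
                cases hwv : hw <;> simp [hs, hss, hbe, hwv, ih u hulen]
-- ===== VERDICT (by name: the statement is the Claim_ definition above) =====
theorem has_unbounded_scanf_string_py_spec : Claim_equal_has_unbounded_scanf_string_py := by
  intro fmt _
  unfold Spec_has_unbounded_scanf_string_py has_unbounded_scanf_string_py has_unbounded_scanf_string_py_alt
  rw [loopA_eq_loopB fmt.toList.length fmt.toList le_rfl]
  cases h : fmt.toList.isEmpty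
  · simp only [h, Bool.false_eq_true, if_false]
    cases loopB fmt.toList <;> simp
  · have hnil : fmt.toList = [] := by simpa using h
    rw [hnil, loopB_nil]
    simp
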